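-- pv_equiv track=rewrite | github.com/fg551926/diagnostic-framework | el.py | get_handover
-- ===== SOURCE A (Python) =====
-- def get_handover(trans, roles):
--     """
--     @param trans: two activities which have a transition
--     @param roles: roles detected in log by pm4py function
--     @return: returns the resource role of the two activities in the transition
--     """
--     t1, t2 = trans
--     t1_role = ''
--     t2_role = ''
--     for role in roles:
--         if t1 in role[0]:
--             t1_role = role[1]
--         if t2 in role[0]:
--             t2_role = role[1]
--     return t1_role, t2_role
-- ===== SOURCE B (Python) =====
-- def get_handover(trans, roles):
--     def role_of(act):
--         # scan back-to-front: the first match in reverse is A's last match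
--         for acts, r in reversed(roles):
--             if act in acts:
--                 return r
--         return ''
--     return role_of(trans[0]), role_of(trans[1])
-- ===== Notes on version B (the rewrite author's own statement) =====
-- stated objective: alternative
-- what changed: B resolves each activity independently by scanning roles back-to-front and returning at the first match (early exit), instead of A's single forward pass that overwrites both accumulators on every match; correct because the first match in reverse order is exactly the last match in forward order.
import Mathlib
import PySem

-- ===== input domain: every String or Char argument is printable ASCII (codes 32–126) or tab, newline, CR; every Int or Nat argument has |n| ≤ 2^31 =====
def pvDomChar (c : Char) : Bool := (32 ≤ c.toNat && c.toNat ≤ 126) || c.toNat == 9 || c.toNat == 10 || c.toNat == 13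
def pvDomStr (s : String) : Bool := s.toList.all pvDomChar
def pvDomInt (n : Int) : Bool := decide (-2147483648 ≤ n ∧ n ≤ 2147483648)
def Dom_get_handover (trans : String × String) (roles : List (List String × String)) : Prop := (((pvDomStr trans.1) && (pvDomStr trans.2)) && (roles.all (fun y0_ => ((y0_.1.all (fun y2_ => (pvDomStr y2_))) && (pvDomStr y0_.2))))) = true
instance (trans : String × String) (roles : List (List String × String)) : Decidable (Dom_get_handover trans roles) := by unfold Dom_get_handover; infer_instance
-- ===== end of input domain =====

-- B scans roles back-to-front per activity with early exit (first match in reverse = A's last match), instead of A's forward overwrite pass.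
-- ===== PORT A =====
def get_handover (trans : String × String) (roles : List (List String × String)) : String × String :=
  let t1 := trans.1
  let t2 := trans.2
  roles.foldl
    (fun (st : String × String) role =>
      ((if role.1.contains t1 then role.2 else st.1),
       (if role.1.contains t2 then role.2 else st.2)))
    ("", "")

-- ===== PORT B =====
-- first role (in the given list order) whose activity list contains act, else ""
def roleOf (act : String) : List (List String × String) → String
  | [] => ""
  | r :: rest => if r.1.contains act then r.2 else roleOf act rest

def get_handover_alt (trans : String × String) (roles : List (List String × String)) : String × String :=
  (roleOf trans.1 roles.reverse, roleOf trans.2 roles.reverse)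

-- ===== PRECONDITION & SPEC =====
def Spec_get_handover (trans : String × String) (roles : List (List String × String)) (out : String × String) : Prop := out = get_handover_alt trans roles
instance (trans : String × String) (roles : List (List String × String)) (out : String × String) : Decidable (Spec_get_handover trans roles out) := by unfold Spec_get_handover; infer_instance

-- ===== CLAIM (what is proved, stated in full; the proofs are below) =====
def Claim_equal_get_handover : Prop := ∀ (trans : String × String) (roles : List (List String × String)), Dom_get_handover trans roles → Spec_get_handover trans roles (get_handover trans roles)

-- ===== LEMMAS AND PROOFS =====
-- roleOf with a default continuation: first match in xs, else the given fallback
def roleOfD (act : String) (s : String) : List (List String × String) → String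
  | [] => s
  | r :: rest => if r.1.contains act then r.2 else roleOfD act s rest

lemma roleOfD_append (act s : String) (xs ys : List (List String × String)) :
    roleOfD act s (xs ++ ys) = roleOfD act (roleOfD act s ys) xs := by
  induction xs with
  | nil => rfl
  | cons r xs ih => simp [roleOfD, ih]

lemma foldl_eq_roleOfD (act s : String) (roles : List (List String × String)) :
    roles.foldl (fun st role => if role.1.contains act then role.2 else st) s =
      roleOfD act s roles.reverse := by
  induction roles generalizing s with
  | nil => rfl
  | cons r roles ih =>
    simp only [List.foldl_cons, List.reverse_cons, roleOfD_append, ih, roleOfD]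

lemma roleOfD_eq_roleOf (act : String) (xs : List (List String × String)) :
    roleOfD act "" xs = roleOf act xs := by
  induction xs with
  | nil => rfl
  | cons r xs ih => simp [roleOfD, roleOf, ih]

lemma pair_foldl (roles : List (List String × String)) (t1 t2 s1 s2 : String) :
    roles.foldl
      (fun (st : String × String) role =>
        ((if role.1.contains t1 then role.2 else st.1),
         (if role.1.contains t2 then role.2 else st.2))) (s1, s2) =
      (roles.foldl (fun s role => if role.1.contains t1 then role.2 else s) s1,
       roles.foldl (fun s role => if role.1.contains t2 then role.2 else s) s2) := by
  induction roles generalizing s1 s2 with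
  | nil => rfl
  | cons r roles ih => simp only [List.foldl_cons, ih]

-- ===== VERDICT (by name: the statement is the Claim_ definition above) =====
theorem get_handover_spec : Claim_equal_get_handover := by
  intro trans roles _
  show get_handover trans roles = get_handover_alt trans roles
  simp only [get_handover, get_handover_alt, pair_foldl, foldl_eq_roleOfD, roleOfD_eq_roleOf]
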